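-- pv_equiv track=rewrite | github.com/danielkongcau-del/PredictiveCoding | src/pc/stage_02_interval_velocity/fmpc_interval_data.py | teacher_step_aligned_rollout_schedules
-- ===== SOURCE A (Python) =====
-- def teacher_step_aligned_rollout_schedules(teacher_steps: int) -> dict[str, tuple[int, ...]]:
--     """Return default teacher-step-aligned rollout knots for 1/2/3-step evaluation."""
--
--     if teacher_steps <= 0:
--         raise ValueError("teacher_steps must be positive.")
--     one_step = (0, int(teacher_steps))
--     two_step = (0, int(round(teacher_steps / 2.0)), int(teacher_steps))
--     three_step = (
--         0,
--         int(round(teacher_steps / 3.0)),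
--         int(round(2.0 * teacher_steps / 3.0)),
--         int(teacher_steps),
--     )
--     schedules = {
--         "1-step": one_step,
--         "2-step": two_step,
--         "3-step": three_step,
--     }
--     for name, knots in schedules.items():
--         if knots[0] != 0 or knots[-1] != teacher_steps:
--             raise ValueError(f"{name} rollout schedule must start at 0 and end at teacher_steps.")
--         if tuple(sorted(knots)) != knots or len(set(knots)) != len(knots):
--             raise ValueError(f"{name} rollout schedule must use strictly increasing teacher-aligned knots.")
--     return schedules
-- ===== SOURCE B (Python) =====
-- def teacher_step_aligned_rollout_schedules(teacher_steps: int) -> dict[str, tuple[int, ...]]: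
--     """Return default teacher-step-aligned rollout knots for 1/2/3-step evaluation."""
--     if teacher_steps <= 2:
--         raise ValueError("teacher_steps must be at least 3 for strictly increasing rollout knots.")
--
--     def _round_half_even(num: int, den: int) -> int:
--         # exact integer round(num/den) with ties to even -- no floating point
--         q, r = divmod(num, den)
--         if 2 * r > den or (2 * r == den and q % 2):
--             return q + 1
--         return q
--
--     return {
--         f"{n}-step": tuple(_round_half_even(k * teacher_steps, n) for k in range(n + 1))
--         for n in (1, 2, 3)
--     }
-- ===== Notes on version B (the rewrite author's own statement) =====
-- stated objective: alternative
-- what changed: B computes each knot with exact integer round-half-to-even arithmetic (divmod) instead of A's float round(), builds all three schedules from the single formula round(k*teacher_steps/n), and drops A's runtime validation loop entirely, guarding teacher_steps >= 3 up front (for teacher_steps <= 2 A's validation raises anyway, so both raise on exactly the same inputs).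
import Mathlib
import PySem

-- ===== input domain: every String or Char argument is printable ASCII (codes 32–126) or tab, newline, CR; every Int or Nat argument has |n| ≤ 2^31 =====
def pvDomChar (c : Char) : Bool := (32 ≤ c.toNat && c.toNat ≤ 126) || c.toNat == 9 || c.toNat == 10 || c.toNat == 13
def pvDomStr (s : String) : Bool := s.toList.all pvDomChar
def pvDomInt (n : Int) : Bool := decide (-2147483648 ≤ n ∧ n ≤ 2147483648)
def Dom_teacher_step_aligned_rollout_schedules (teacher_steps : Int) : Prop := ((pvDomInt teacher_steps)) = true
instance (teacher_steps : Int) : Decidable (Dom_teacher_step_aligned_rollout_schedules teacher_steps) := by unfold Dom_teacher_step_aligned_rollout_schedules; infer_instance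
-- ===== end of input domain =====

-- B computes the knots with exact integer round-half-to-even arithmetic (divmod) instead of
-- A's float round(), builds all three schedules from the single formula round(k*ts/n), and
-- drops A's runtime validation loop (guarding teacher_steps >= 3 up front, where A's
-- validation raises anyway).

-- ===== PORT A =====
-- pvRound a b = Python's int(round(a / b)) for 0 < b; exact on the |a| ≤ 3·2^31 integers that
-- arise here (a/b is then exactly representable or far from a tie, so float round = rational
-- round half-to-even, modelled below).
def pvRound (a b : Int) : Int :=
  let m := PySem.Int.floordiv a b
  let r := a - m * b
  if 2 * r = b then (if PySem.Int.mod m 2 = 0 then m else m + 1)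
  else PySem.Int.floordiv (2 * a + b) (2 * b)

-- knots[0] = 0, knots[-1] = teacher_steps, sorted(knots) = knots, len(set(knots)) = len(knots)
def pvValid (ts : Int) (knots : List Int) : Bool :=
  decide (PySem.List.pyGet? knots 0 = some 0) &&
  decide (PySem.List.pyGet? knots (-1) = some ts) &&
  decide (PySem.List.sorted knots id false = knots) &&
  decide ((PySem.List.dedup knots).length = knots.length)

-- on inputs where the Python raises ValueError, the port returns [] (those are outside Pre_)
def teacher_step_aligned_rollout_schedules (teacher_steps : Int) : List (String × List Int) :=
  if teacher_steps ≤ 0 then [] else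
  let one_step : List Int := [0, teacher_steps]
  let two_step : List Int := [0, pvRound teacher_steps 2, teacher_steps]
  let three_step : List Int :=
    [0, pvRound teacher_steps 3, pvRound (2 * teacher_steps) 3, teacher_steps]
  let schedules : List (String × List Int) :=
    [("1-step", one_step), ("2-step", two_step), ("3-step", three_step)]
  if schedules.all (fun p => pvValid teacher_steps p.2) then schedules else []

-- ===== PORT B =====
-- exact integer round(num/den) with ties to even; q, r = divmod(num, den) with 0 < den
def pvHalfEven (num den : Int) : Int :=
  let q := PySem.Int.floordiv num den
  let r := PySem.Int.mod num den
  if 2 * r > den ∨ (2 * r = den ∧ PySem.Int.mod q 2 ≠ 0) then q + 1 else q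

-- on inputs where B raises ValueError (teacher_steps ≤ 2), the port returns []
def teacher_step_aligned_rollout_schedules_alt (teacher_steps : Int) : List (String × List Int) :=
  if teacher_steps ≤ 2 then [] else
  [(1 : Int), 2, 3].map (fun n =>
    (PySem.Int.toStr n ++ "-step",
     (PySem.List.pyRange 0 (n + 1) 1).map (fun k => pvHalfEven (k * teacher_steps) n)))

-- ===== PRECONDITION & SPEC =====
-- Pre_ excludes exactly the inputs where the Python A raises ValueError: teacher_steps ≤ 0
-- (explicit guard) and teacher_steps ∈ {1, 2} (duplicate knots fail A's validation loop).
def Pre_teacher_step_aligned_rollout_schedules (teacher_steps : Int) : Prop := 3 ≤ teacher_steps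
instance (teacher_steps : Int) : Decidable (Pre_teacher_step_aligned_rollout_schedules teacher_steps) := by unfold Pre_teacher_step_aligned_rollout_schedules; infer_instance
def pvWitness_teacher_step_aligned_rollout_schedules : Int := 5

def Spec_teacher_step_aligned_rollout_schedules (teacher_steps : Int) (out : List (String × List Int)) : Prop := out = teacher_step_aligned_rollout_schedules_alt teacher_steps
instance (teacher_steps : Int) (out : List (String × List Int)) : Decidable (Spec_teacher_step_aligned_rollout_schedules teacher_steps out) := by unfold Spec_teacher_step_aligned_rollout_schedules; infer_instance

-- ===== CLAIM =====
def Claim_equal_teacher_step_aligned_rollout_schedules : Prop := ∀ (teacher_steps : Int), Dom_teacher_step_aligned_rollout_schedules teacher_steps → Pre_teacher_step_aligned_rollout_schedules teacher_steps → Spec_teacher_step_aligned_rollout_schedules teacher_steps (teacher_step_aligned_rollout_schedules teacher_steps)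

-- ===== LEMMAS AND PROOFS =====

-- A's float-model rounding and B's integer rounding agree for every positive divisor.
theorem pvRound_eq_pvHalfEven (a b : Int) (hb : 0 < b) : pvRound a b = pvHalfEven a b := by
  have hfd : PySem.Int.floordiv a b * b + PySem.Int.mod a b = a :=
    PySem.Int.floordiv_mul_add_mod a b
  have hr0 : 0 ≤ PySem.Int.mod a b := PySem.Int.mod_nonneg a hb
  have hrb : PySem.Int.mod a b < b := PySem.Int.mod_lt a hb
  have hr : a - PySem.Int.floordiv a b * b = PySem.Int.mod a b := by omega
  show (if 2 * (a - PySem.Int.floordiv a b * b) = b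
        then (if PySem.Int.mod (PySem.Int.floordiv a b) 2 = 0 then PySem.Int.floordiv a b else PySem.Int.floordiv a b + 1)
        else PySem.Int.floordiv (2 * a + b) (2 * b)) =
       (if 2 * PySem.Int.mod a b > b ∨ (2 * PySem.Int.mod a b = b ∧ PySem.Int.mod (PySem.Int.floordiv a b) 2 ≠ 0)
        then PySem.Int.floordiv a b + 1 else PySem.Int.floordiv a b)
  rw [hr]
  by_cases htie : 2 * PySem.Int.mod a b = b
  · rw [if_pos htie]
    by_cases hpar : PySem.Int.mod (PySem.Int.floordiv a b) 2 = 0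
    · rw [if_pos hpar, if_neg (by omega)]
    · rw [if_neg hpar, if_pos (Or.inr ⟨htie, hpar⟩)]
  · rw [if_neg htie]
    have h2 : PySem.Int.floordiv (2 * a + b) (2 * b) =
        if 2 * PySem.Int.mod a b > b then PySem.Int.floordiv a b + 1 else PySem.Int.floordiv a b := by
      rw [PySem.Int.floordiv_eq_iff_of_pos (by omega)]
      split_ifs with hgt
      · constructor <;> nlinarith
      · have hlt : 2 * PySem.Int.mod a b < b := by omega
        constructor <;> nlinarith
    rw [h2]
    split_ifs with hgt h3 <;> first | rfl | omega

theorem pvHalfEven_mul (n t : Int) (h : 0 < n) : pvHalfEven (n * t) n = t := by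
  have hq : PySem.Int.floordiv (n * t) n = t := by
    rw [PySem.Int.floordiv_eq_iff_of_pos h]; constructor <;> nlinarith
  have hr : PySem.Int.mod (n * t) n = 0 := by
    have := PySem.Int.floordiv_mul_add_mod (n * t) n
    rw [hq] at this; nlinarith
  show (if 2 * PySem.Int.mod (n * t) n > n ∨
        (2 * PySem.Int.mod (n * t) n = n ∧ PySem.Int.mod (PySem.Int.floordiv (n * t) n) 2 ≠ 0)
        then PySem.Int.floordiv (n * t) n + 1 else PySem.Int.floordiv (n * t) n) = t
  rw [hq, hr, if_neg (by omega)]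

theorem pvHalfEven_one (t : Int) : pvHalfEven t 1 = t := by
  have := pvHalfEven_mul 1 t one_pos
  rwa [one_mul] at this

theorem pvHalfEven_zero (n : Int) (h : 0 < n) : pvHalfEven 0 n = 0 := by
  have := pvHalfEven_mul n 0 h
  rwa [mul_zero] at this

-- two-sided bracket for pvHalfEven; strict when the divisor is odd (no exact ties)
theorem pvHalfEven_bounds (a b : Int) (hb : 0 < b) :
    2 * a - b ≤ 2 * b * pvHalfEven a b ∧ 2 * b * pvHalfEven a b ≤ 2 * a + b := by
  have hfd : PySem.Int.floordiv a b * b + PySem.Int.mod a b = a :=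
    PySem.Int.floordiv_mul_add_mod a b
  have hr0 : 0 ≤ PySem.Int.mod a b := PySem.Int.mod_nonneg a hb
  have hrb : PySem.Int.mod a b < b := PySem.Int.mod_lt a hb
  show 2 * a - b ≤ 2 * b * (if 2 * PySem.Int.mod a b > b ∨
        (2 * PySem.Int.mod a b = b ∧ PySem.Int.mod (PySem.Int.floordiv a b) 2 ≠ 0)
        then PySem.Int.floordiv a b + 1 else PySem.Int.floordiv a b) ∧
      2 * b * (if 2 * PySem.Int.mod a b > b ∨
        (2 * PySem.Int.mod a b = b ∧ PySem.Int.mod (PySem.Int.floordiv a b) 2 ≠ 0)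
        then PySem.Int.floordiv a b + 1 else PySem.Int.floordiv a b) ≤ 2 * a + b
  split_ifs with h
  · rcases h with h | ⟨h, _⟩ <;> constructor <;> nlinarith
  · push Not at h
    have hle : 2 * PySem.Int.mod a b ≤ b := h.1
    constructor <;> nlinarith

theorem pvHalfEven_bounds_odd (a b : Int) (hb : 0 < b) (hodd : ¬ (2 ∣ b)) :
    2 * a - b < 2 * b * pvHalfEven a b ∧ 2 * b * pvHalfEven a b < 2 * a + b := by
  have hfd : PySem.Int.floordiv a b * b + PySem.Int.mod a b = a :=
    PySem.Int.floordiv_mul_add_mod a b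
  have hr0 : 0 ≤ PySem.Int.mod a b := PySem.Int.mod_nonneg a hb
  have hrb : PySem.Int.mod a b < b := PySem.Int.mod_lt a hb
  have hne : 2 * PySem.Int.mod a b ≠ b := fun h => hodd ⟨PySem.Int.mod a b, h.symm⟩
  show 2 * a - b < 2 * b * (if 2 * PySem.Int.mod a b > b ∨
        (2 * PySem.Int.mod a b = b ∧ PySem.Int.mod (PySem.Int.floordiv a b) 2 ≠ 0)
        then PySem.Int.floordiv a b + 1 else PySem.Int.floordiv a b) ∧
      2 * b * (if 2 * PySem.Int.mod a b > b ∨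
        (2 * PySem.Int.mod a b = b ∧ PySem.Int.mod (PySem.Int.floordiv a b) 2 ≠ 0)
        then PySem.Int.floordiv a b + 1 else PySem.Int.floordiv a b) < 2 * a + b
  split_ifs with h
  · rcases h with h | ⟨h, _⟩
    · constructor <;> nlinarith
    · exact absurd h hne
  · have hlt : 2 * PySem.Int.mod a b < b := by omega
    constructor <;> nlinarith

-- A's validation loop accepts the strictly increasing knot lists
theorem pvValid_one (ts : Int) (h0 : 0 < ts) : pvValid ts [0, ts] = true := by
  unfold pvValid
  have hsorted : PySem.List.sorted [0, ts] id false = [0, ts] :=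
    PySem.List.sorted_eq_self_of_pairwise _ id (by
      simp only [List.pairwise_cons, List.mem_cons, List.not_mem_nil, id]
      refine ⟨fun a h => ?_, fun a h => ?_, List.Pairwise.nil⟩ <;>
        rcases h with rfl | rfl | h <;> omega)
  simp [hsorted, PySem.List.pyGet?, PySem.List.pyIdx?, PySem.List.dedup, PySem.Set.ofList,
    PySem.Set.add, h0.ne']

theorem pvValid_two (ts x : Int) (h0 : 0 < x) (hxt : x < ts) :
    pvValid ts [0, x, ts] = true := by
  unfold pvValid
  have hsorted : PySem.List.sorted [0, x, ts] id false = [0, x, ts] :=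
    PySem.List.sorted_eq_self_of_pairwise _ id (by
      simp only [List.pairwise_cons, List.mem_cons, List.not_mem_nil, id]
      refine ⟨fun a h => ?_, fun a h => ?_, fun a h => ?_, List.Pairwise.nil⟩ <;>
        (rcases h with rfl | rfl | rfl | h <;> omega))
  simp [hsorted, PySem.List.pyGet?, PySem.List.pyIdx?, PySem.List.dedup, PySem.Set.ofList,
    PySem.Set.add, h0.ne', hxt.ne', (h0.trans hxt).ne']

theorem pvValid_three (ts x y : Int) (h0 : 0 < x) (hxy : x < y) (hyt : y < ts) :
    pvValid ts [0, x, y, ts] = true := by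
  unfold pvValid
  have hsorted : PySem.List.sorted [0, x, y, ts] id false = [0, x, y, ts] :=
    PySem.List.sorted_eq_self_of_pairwise _ id (by
      simp only [List.pairwise_cons, List.mem_cons, List.not_mem_nil, id]
      refine ⟨fun a h => ?_, fun a h => ?_, fun a h => ?_, fun a h => ?_, List.Pairwise.nil⟩ <;>
        rcases h with rfl | rfl | rfl | rfl | h <;> omega)
  simp [hsorted, PySem.List.pyGet?, PySem.List.pyIdx?, PySem.List.dedup, PySem.Set.ofList,
    PySem.Set.add, h0.ne', hxy.ne', hyt.ne', (h0.trans hxy).ne', (hxy.trans hyt).ne',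
    (h0.trans (hxy.trans hyt)).ne']

theorem pvRange2 : PySem.List.pyRange 0 (1 + 1) 1 = [0, 1] := by decide
theorem pvRange3 : PySem.List.pyRange 0 (2 + 1) 1 = [0, 1, 2] := by decide
theorem pvRange4 : PySem.List.pyRange 0 (3 + 1) 1 = [0, 1, 2, 3] := by decide

-- ===== VERDICT =====
theorem teacher_step_aligned_rollout_schedules_spec : Claim_equal_teacher_step_aligned_rollout_schedules := by
  intro ts _ hpre
  have h3 : (3 : Int) ≤ ts := hpre
  unfold Spec_teacher_step_aligned_rollout_schedules
  unfold teacher_step_aligned_rollout_schedules teacher_step_aligned_rollout_schedules_alt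
  rw [if_neg (by omega : ¬ ts ≤ 0), if_neg (by omega : ¬ ts ≤ 2)]
  have hb2 := pvHalfEven_bounds ts 2 (by norm_num)
  have hb3a := pvHalfEven_bounds_odd ts 3 (by norm_num) (by decide)
  have hb3b := pvHalfEven_bounds_odd (2 * ts) 3 (by norm_num) (by decide)
  have hx2 : 0 < pvHalfEven ts 2 ∧ pvHalfEven ts 2 < ts := by omega
  have hx3 : 0 < pvHalfEven ts 3 ∧ pvHalfEven ts 3 < pvHalfEven (2 * ts) 3 ∧
      pvHalfEven (2 * ts) 3 < ts := by omega
  have hv1 := pvValid_one ts (by omega)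
  have hv2 := pvValid_two ts (pvHalfEven ts 2) hx2.1 hx2.2
  have hv3 := pvValid_three ts (pvHalfEven ts 3) (pvHalfEven (2 * ts) 3)
    hx3.1 hx3.2.1 hx3.2.2
  simp only [pvRange2, pvRange3, pvRange4, List.map,
    pvRound_eq_pvHalfEven ts 2 (by norm_num),
    pvRound_eq_pvHalfEven ts 3 (by norm_num),
    pvRound_eq_pvHalfEven (2 * ts) 3 (by norm_num),
    zero_mul, one_mul,
    pvHalfEven_zero 1 one_pos, pvHalfEven_zero 2 (by norm_num), pvHalfEven_zero 3 (by norm_num),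
    pvHalfEven_one ts, pvHalfEven_mul 2 ts (by norm_num), pvHalfEven_mul 3 ts (by norm_num)]
  rw [if_pos (by simp [List.all, hv1, hv2, hv3])]
  norm_num [show PySem.Int.toStr 1 ++ "-step" = "1-step" from by decide,
    show PySem.Int.toStr 2 ++ "-step" = "2-step" from by decide,
    show PySem.Int.toStr 3 ++ "-step" = "3-step" from by decide]
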